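-- pv_equiv track=rewrite | github.com/omrastogi/dsa_questions | 3306-substing-count-every-vowel-n-k-consonants-II.py | check_vowels
-- ===== SOURCE A (Python) =====
-- def check_vowels(wrd, k):
--     vowels = {'a', 'e', 'i', 'o', 'u'}
--     vowel_set = set()
--     consonant_count = 0
--
--     for char in wrd:
--         if char in vowels:
--             vowel_set.add(char)
--         else:
--             consonant_count += 1
--
--     return len(vowel_set) == 5 and consonant_count == k
-- ===== SOURCE B (Python) =====
-- def check_vowels(wrd, k):
--     counts = [wrd.count(v) for v in "aeiou"]
--     return min(counts) > 0 and len(wrd) - sum(counts) == k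
-- ===== Notes on version B (the rewrite author's own statement) =====
-- stated objective: alternative
-- what changed: Instead of one stateful scan maintaining a seen-vowel set and consonant counter, B iterates over the five vowels, counting each with wrd.count, checks min(counts) > 0 for presence of all vowels, and derives the consonant count arithmetically as len(wrd) - sum(counts).
import Mathlib
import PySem

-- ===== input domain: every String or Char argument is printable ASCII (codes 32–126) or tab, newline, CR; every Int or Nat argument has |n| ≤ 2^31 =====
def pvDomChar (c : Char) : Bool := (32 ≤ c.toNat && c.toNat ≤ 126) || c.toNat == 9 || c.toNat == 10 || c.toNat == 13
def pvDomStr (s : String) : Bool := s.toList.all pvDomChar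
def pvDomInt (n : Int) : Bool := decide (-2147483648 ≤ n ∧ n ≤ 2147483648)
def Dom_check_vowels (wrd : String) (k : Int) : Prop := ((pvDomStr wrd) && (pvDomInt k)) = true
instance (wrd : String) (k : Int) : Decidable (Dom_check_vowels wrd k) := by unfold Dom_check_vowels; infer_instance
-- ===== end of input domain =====

-- B counts each vowel separately (wrd.count per vowel), tests min(counts) > 0, and gets consonants as len(wrd) - sum(counts); return value only.
-- ===== PORT A =====
def check_vowels (wrd : String) (k : Int) : Bool :=
  let vowels : PySem.Set Char := PySem.Set.ofList ['a','e','i','o','u']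
  let st := wrd.toList.foldl
    (fun (st : PySem.Set Char × Int) char =>
      if PySem.Set.contains vowels char then (PySem.Set.add st.1 char, st.2)
      else (st.1, st.2 + 1))
    (PySem.Set.empty, 0)
  decide (PySem.Set.len st.1 = 5) && decide (st.2 = k)

-- ===== PORT B =====
def check_vowels_alt (wrd : String) (k : Int) : Bool :=
  let counts : List Int := "aeiou".toList.map (fun v => (PySem.Str.count wrd (String.ofList [v]) : Int))
  (match PySem.List.min? counts (fun x => x) with
   | some m => decide (0 < m)
   | none => false)
  && decide ((PySem.Str.len wrd : Int) - counts.sum = k)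

-- ===== PRECONDITION & SPEC =====
def Spec_check_vowels (wrd : String) (k : Int) (out : Bool) : Prop := out = check_vowels_alt wrd k
instance (wrd : String) (k : Int) (out : Bool) : Decidable (Spec_check_vowels wrd k out) := by unfold Spec_check_vowels; infer_instance

-- ===== CLAIM (what is proved, stated in full; the proofs are below) =====
def Claim_equal_check_vowels : Prop := ∀ (wrd : String) (k : Int), Dom_check_vowels wrd k → Spec_check_vowels wrd k (check_vowels wrd k)

-- ===== LEMMAS AND PROOFS =====

def pvV : PySem.Set Char := PySem.Set.ofList ['a','e','i','o','u']

-- A's loop in closed form: the vowel set is the (deduped) vowels of the word, the counter counts non-vowels.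
theorem pvFoldA (l : List Char) (s : PySem.Set Char) (c : Int) :
    l.foldl
      (fun (st : PySem.Set Char × Int) char =>
        if PySem.Set.contains pvV char then (PySem.Set.add st.1 char, st.2)
        else (st.1, st.2 + 1)) (s, c)
    = (PySem.Set.update s (l.filter (PySem.Set.contains pvV)),
       c + (l.countP (fun ch => !PySem.Set.contains pvV ch) : Int)) := by
  induction l generalizing s c with
  | nil => simp [PySem.Set.update]
  | cons x xs ih =>
    rw [List.foldl_cons]
    by_cases hx : PySem.Set.contains pvV x = true
    · rw [if_pos hx, ih,
        show List.filter (PySem.Set.contains pvV) (x :: xs)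
            = x :: List.filter (PySem.Set.contains pvV) xs from by
          rw [List.filter_cons, if_pos hx],
        PySem.Set.update_cons, List.countP_cons]
      rw [show (!PySem.Set.contains pvV x) = false from by rw [hx]; rfl]
      simp
    · rw [if_neg hx, ih,
        show List.filter (PySem.Set.contains pvV) (x :: xs)
            = List.filter (PySem.Set.contains pvV) xs from by
          rw [List.filter_cons, if_neg hx],
        List.countP_cons]
      rw [show (!PySem.Set.contains pvV x) = true from by
        rw [Bool.eq_false_iff.2 hx]; rfl]
      rw [Prod.mk.injEq]
      refine ⟨rfl, ?_⟩
      rw [if_pos rfl]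
      push_cast
      ring

-- the five-element vowel set is full iff every vowel occurs in the word
theorem pvLen_iff (l : List Char) :
    PySem.Set.len (PySem.Set.ofList (l.filter (PySem.Set.contains pvV))) = 5
      ↔ ∀ v ∈ (pvV : List Char), v ∈ l := by
  set F := PySem.Set.ofList (l.filter (PySem.Set.contains pvV)) with hF
  have hFnd : List.Nodup F := PySem.Set.nodup_ofList _
  have hVnd : List.Nodup (pvV : List Char) := by decide
  have hVlen : (pvV : List Char).length = 5 := by decide
  have hFV : F ⊆ (pvV : List Char) := by
    intro x hx
    have hx' : x ∈ l.filter (PySem.Set.contains pvV) := (PySem.Set.mem_ofList _ _).1 hx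
    exact (PySem.Set.contains_iff _ _).1 (List.of_mem_filter hx')
  have hlen : PySem.Set.len F = (F.length : Int) := rfl
  constructor
  · intro h5 v hvV
    have hFlen : F.length = 5 := by
      have h := hlen ▸ h5; exact_mod_cast h
    have hsub : List.Subperm F (pvV : List Char) := hFnd.subperm hFV
    have hperm : List.Perm F (pvV : List Char) :=
      hsub.perm_of_length_le (by rw [hVlen, hFlen])
    have hxF : v ∈ F := (hperm.symm.mem_iff).1 hvV
    have hx' : v ∈ l.filter (PySem.Set.contains pvV) := (PySem.Set.mem_ofList _ _).1 hxF
    exact List.mem_of_mem_filter hx'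
  · intro hall
    have hVF : (pvV : List Char) ⊆ F := by
      intro x hxV
      exact (PySem.Set.mem_ofList _ _).2
        (List.mem_filter.2 ⟨hall x hxV, (PySem.Set.contains_iff _ _).2 hxV⟩)
    have h1 : F.length ≤ (pvV : List Char).length := (hFnd.subperm hFV).length_le
    have h2 : (pvV : List Char).length ≤ F.length := (hVnd.subperm hVF).length_le
    have hFlen : F.length = 5 := by omega
    rw [hlen, hFlen]; rfl

-- str.count with a single-character needle is List.count (fuel-recursion of PySem.Chars.count.go unrolled)
theorem pvGoSingle (v : Char) (l : List Char) (fuel acc : Nat) (h : l.length ≤ fuel) :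
    PySem.Chars.count.go [v] fuel l acc = acc + l.count v := by
  induction l generalizing fuel acc with
  | nil =>
    cases fuel <;> simp [PySem.Chars.count.go]
  | cons x t ih =>
    cases fuel with
    | zero => simp at h
    | succ f =>
      have hf : t.length ≤ f := by simpa using h
      by_cases hx : v = x
      · subst hx
        have hpre : List.isPrefixOf [v] (v :: t) = true := by
          simp [List.isPrefixOf]
        rw [show PySem.Chars.count.go [v] (f + 1) (v :: t) acc
              = PySem.Chars.count.go [v] f ((v :: t).drop [v].length) (acc + 1) from by
            simp [PySem.Chars.count.go, hpre]]
        simp only [List.length_singleton, List.drop_succ_cons, List.drop_zero]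
        rw [ih f (acc + 1) hf, List.count_cons_self]
        omega
      · have hpre : List.isPrefixOf [v] (x :: t) = false := by
          simp [List.isPrefixOf, hx]
        rw [show PySem.Chars.count.go [v] (f + 1) (x :: t) acc
              = PySem.Chars.count.go [v] f t acc from by
            simp [PySem.Chars.count.go, hpre]]
        rw [ih f acc hf, List.count_cons_of_ne (fun h => hx h.symm)]

theorem pvCountSingle (v : Char) (l : List Char) :
    PySem.Chars.count l [v] = l.count v := by
  rw [show PySem.Chars.count l [v] = PySem.Chars.count.go [v] l.length l 0 from by
    simp [PySem.Chars.count]]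
  simpa using pvGoSingle v l l.length 0 (le_refl _)

-- a disjunctive countP splits off one count when the new element fails the rest of the test
theorem pvCountPOr (v : Char) (q : Char → Bool) (hq : q v = false) (l : List Char) :
    l.countP (fun c => (c == v) || q c) = l.count v + l.countP q := by
  induction l with
  | nil => simp
  | cons x t ih =>
    by_cases hx : x = v
    · subst hx
      rw [List.countP_cons, List.count_cons_self, List.countP_cons]
      simp [hq, ih]
      omega
    · rw [List.countP_cons, List.count_cons_of_ne hx, List.countP_cons]
      have : ((x == v) || q x) = q x := by
        simp [hx]
      rw [this, ih]
      omega

-- PySem.Set.contains of the vowel set, as a decidable 5-way disjunction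
theorem pvContainsEq : PySem.Set.contains pvV
    = (fun c => (c == 'a') || ((c == 'e') || ((c == 'i') || ((c == 'o') || (c == 'u'))))) := by
  funext c
  rw [Bool.eq_iff_iff]
  simp [pvV, PySem.Set.mem_ofList]

-- vowels of the word, counted as a whole, equal the sum of the five per-vowel counts
theorem pvCountPVowels (l : List Char) :
    l.countP (PySem.Set.contains pvV)
      = l.count 'a' + (l.count 'e' + (l.count 'i' + (l.count 'o' + l.count 'u'))) := by
  rw [pvContainsEq, pvCountPOr 'a' _ (by decide), pvCountPOr 'e' _ (by decide),
      pvCountPOr 'i' _ (by decide), pvCountPOr 'o' _ (by decide)]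
  rfl

-- ===== VERDICT (by name: the statement is the Claim_ definition above) =====
theorem check_vowels_spec : Claim_equal_check_vowels := by
  intro wrd k _
  show check_vowels wrd k = check_vowels_alt wrd k
  have hv' : PySem.Set.ofList ['a','e','i','o','u'] = pvV := rfl
  have hstr : "aeiou".toList = ['a','e','i','o','u'] := by decide
  simp only [check_vowels, check_vowels_alt, hv', hstr]
  rw [show (PySem.Set.empty : PySem.Set Char) = ([] : List Char) from rfl]
  rw [pvFoldA, PySem.Set.update_nil_left]
  simp only [List.map_cons, List.map_nil, PySem.Str.count_eq,
    show (String.ofList ['a']).toList = ['a'] from rfl,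
    show (String.ofList ['e']).toList = ['e'] from rfl,
    show (String.ofList ['i']).toList = ['i'] from rfl,
    show (String.ofList ['o']).toList = ['o'] from rfl,
    show (String.ofList ['u']).toList = ['u'] from rfl,
    pvCountSingle, PySem.List.min?_id_cons]
  congr 1
  · rw [decide_eq_decide, pvLen_iff,
      show (pvV : List Char) = ['a','e','i','o','u'] from rfl]
    simp only [List.forall_mem_cons, List.foldl_cons, List.foldl_nil, lt_min_iff, Int.natCast_pos, List.count_pos_iff]
    tauto
  · rw [decide_eq_decide]
    have hlen := List.length_eq_countP_add_countP (l := wrd.toList) (PySem.Set.contains pvV)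
    have hV := pvCountPVowels wrd.toList
    have hnp : List.countP (fun ch => !PySem.Set.contains pvV ch) wrd.toList
        = List.countP (fun a => decide ¬(PySem.Set.contains pvV a = true)) wrd.toList := by
      congr 1
      funext a
      cases PySem.Set.contains pvV a <;> rfl
    rw [hnp]
    simp only [List.sum_cons, List.sum_nil, PySem.Str.len_eq]
    omega
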